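-- pv_equiv track=rewrite | github.com/pasan3251/Competitive-Programming | CSES/Mathematics/7_divisor_analyse.py | mul_divisors
-- ===== SOURCE A (Python) =====
-- def mul_divisors(n):
--     mul = 1
--     p = 2
--
--     while p <= n // 2:
--         if n % p == 0:
--             mul *= p
--         p += 1
--     if n > 1:
--         mul *= n
--
--     return mul
-- ===== SOURCE B (Python) =====
-- def mul_divisors(n):
--     if n <= 1:
--         return 1
--     mul = n
--     i = 2
--     while i * i <= n:
--         if n % i == 0:
--             mul *= i
--             j = n // i
--             if j != i:
--                 mul *= j
--         i += 1
--     return mul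
-- ===== Notes on version B (the rewrite author's own statement) =====
-- stated objective: faster
-- what changed: B enumerates divisors in complementary pairs (i, n//i) only up to sqrt(n) instead of scanning every candidate up to n//2.
import Mathlib
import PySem

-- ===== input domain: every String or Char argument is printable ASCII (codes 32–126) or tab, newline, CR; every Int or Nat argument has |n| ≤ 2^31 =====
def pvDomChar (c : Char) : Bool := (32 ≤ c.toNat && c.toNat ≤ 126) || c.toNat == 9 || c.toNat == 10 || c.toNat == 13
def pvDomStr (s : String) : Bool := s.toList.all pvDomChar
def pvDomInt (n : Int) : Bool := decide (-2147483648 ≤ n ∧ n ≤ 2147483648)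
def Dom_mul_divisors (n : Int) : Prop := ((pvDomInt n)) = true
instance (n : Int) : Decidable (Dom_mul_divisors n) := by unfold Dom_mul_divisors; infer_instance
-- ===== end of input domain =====

-- B replaces A's scan of every candidate divisor up to n//2 by the paired
-- enumeration (i, n//i) of divisors with i*i <= n: same value, asymptotically faster.

-- ===== PORT A =====
-- while p <= n // 2: if n % p == 0: mul *= p; p += 1  — the loop is the fold over range(2, n//2 + 1)
def mul_divisors (n : Int) : Int :=
  let mul := (PySem.List.pyRange 2 (PySem.Int.floordiv n 2 + 1) 1).foldl
    (fun mul p => if PySem.Int.mod n p = 0 then mul * p else mul) 1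
  if n > 1 then mul * n else mul

-- ===== PORT B =====
-- B's while loop: i counts up while i*i <= n; terminates since i*i ≤ n forces i ≤ n.
def mulDivAltLoop (n : Int) (i : Int) (mul : Int) : Int :=
  if _h : i * i ≤ n then
    mulDivAltLoop n (i + 1)
      (if PySem.Int.mod n i = 0 then
        (if PySem.Int.floordiv n i ≠ i then mul * i * PySem.Int.floordiv n i else mul * i)
       else mul)
  else mul
termination_by (n + 1 - i).toNat
decreasing_by
  have hi : i ≤ n := by nlinarith [sq_nonneg i, sq_nonneg (i - 1)]
  omega

def mul_divisors_alt (n : Int) : Int :=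
  if n ≤ 1 then 1 else mulDivAltLoop n 2 n

-- ===== PRECONDITION & SPEC =====
def Spec_mul_divisors (n : Int) (out : Int) : Prop := out = mul_divisors_alt n
instance (n : Int) (out : Int) : Decidable (Spec_mul_divisors n out) := by unfold Spec_mul_divisors; infer_instance

-- ===== CLAIM (what is proved, stated in full; the proofs are below) =====
def Claim_equal_mul_divisors : Prop := ∀ (n : Int), Dom_mul_divisors n → Spec_mul_divisors n (mul_divisors n)

-- ===== LEMMAS AND PROOFS =====

-- peel the left end off an integer-interval product
theorem prod_Icc_cons_left (a b : ℤ) (h : a ≤ b) (f : ℤ → ℤ) :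
    ∏ i ∈ Finset.Icc a b, f i = f a * ∏ i ∈ Finset.Icc (a + 1) b, f i := by
  have hins : Finset.Icc a b = insert a (Finset.Icc (a + 1) b) := by
    apply Finset.ext; intro x
    simp only [Finset.mem_insert, Finset.mem_Icc]; omega
  rw [hins, Finset.prod_insert (by simp [Finset.mem_Icc])]

-- A's fold over range(a, b+1) is the Icc product of 'p if p ∣ n else 1'
theorem foldA_eq_prod (n : ℤ) : ∀ (a b mul : ℤ),
    (PySem.List.pyRange a (b + 1) 1).foldl
      (fun mul p => if PySem.Int.mod n p = 0 then mul * p else mul) mul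
    = mul * ∏ i ∈ Finset.Icc a b, (if i ∣ n then i else 1) := by
  intro a b
  by_cases hab : a ≤ b
  · obtain ⟨m, hm⟩ : ∃ m : ℕ, b = a + m := ⟨(b - a).toNat, by omega⟩
    subst hm
    clear hab
    induction m generalizing a with
    | zero =>
      intro mul
      simp only [Nat.cast_zero, add_zero]
      rw [PySem.List.pyRange_one_cons (by omega), PySem.List.pyRange_one_eq_nil (by omega)]
      simp only [List.foldl_cons, List.foldl_nil, Finset.Icc_self, Finset.prod_singleton,
        PySem.Int.mod_eq_zero_iff_dvd]
      split <;> ring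
    | succ m ih =>
      intro mul
      rw [PySem.List.pyRange_one_cons (by push_cast; omega)]
      simp only [List.foldl_cons]
      have h1 : a + ((m+1 : ℕ) : ℤ) + 1 = (a+1) + (m:ℤ) + 1 := by push_cast; ring
      rw [h1, ih (a+1)]
      rw [prod_Icc_cons_left a (a + ((m+1:ℕ):ℤ)) (by push_cast; omega)]
      have h2 : a + ((m+1 : ℕ) : ℤ) = (a+1) + (m:ℤ) := by push_cast; ring
      rw [h2]
      simp only [PySem.Int.mod_eq_zero_iff_dvd]
      split <;> ring
  · intro mul
    rw [PySem.List.pyRange_one_eq_nil (by omega), Finset.Icc_eq_empty (by omega)]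
    simp

-- B's loop accumulates the Icc product of paired factors up to s = isqrt(n)
theorem loopB_eq_prod (n : ℤ) (s : ℤ)
    (hs0 : 1 ≤ s) (hs1 : s * s ≤ n) (hs2 : n < (s + 1) * (s + 1)) :
    ∀ (i mul : ℤ), 2 ≤ i →
    mulDivAltLoop n i mul
    = mul * ∏ j ∈ Finset.Icc i s,
        (if j ∣ n then j * (if n / j ≠ j then n / j else 1) else 1) := by
  have f3a : ∀ i : ℤ, 1 ≤ i → i ≤ s → i * i ≤ n := by intro i h1 h2; nlinarith
  have f3b : ∀ i : ℤ, 1 ≤ i → i * i ≤ n → i ≤ s := by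
    intro i h1 h2; by_contra hc; push Not at hc; nlinarith
  have key : ∀ (m : ℕ) (i mul : ℤ), 2 ≤ i → (s + 1 - i).toNat = m →
      mulDivAltLoop n i mul
      = mul * ∏ j ∈ Finset.Icc i s,
          (if j ∣ n then j * (if n / j ≠ j then n / j else 1) else 1) := by
    intro m
    induction m with
    | zero =>
      intro i mul hi hm
      rw [mulDivAltLoop, dif_neg (by
        intro hle
        have := f3b i (by omega) hle
        omega)]
      rw [Finset.Icc_eq_empty (by omega)]
      simp
    | succ m ih =>
      intro i mul hi hm
      have his : i ≤ s := by omega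
      rw [mulDivAltLoop, dif_pos (f3a i (by omega) his)]
      rw [ih (i + 1) _ (by omega) (by omega)]
      rw [prod_Icc_cons_left i s his]
      simp only [PySem.Int.mod_eq_zero_iff_dvd,
        PySem.Int.floordiv_eq_ediv_of_pos (show (0:ℤ) < i by omega)]
      split_ifs <;> ring
  intro i mul hi
  exact key (s + 1 - i).toNat i mul hi rfl

-- the divisor-pairing identity: scanning [2, n/2] = pairing (i, n/i) over [2, isqrt n]
theorem pairing (n : ℤ) (hn : 2 ≤ n) (s : ℤ)
    (hs0 : 1 ≤ s) (hs1 : s * s ≤ n) (hs2 : n < (s + 1) * (s + 1)) :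
    ∏ i ∈ Finset.Icc 2 (n / 2), (if i ∣ n then i else 1)
    = ∏ j ∈ Finset.Icc 2 s, (if j ∣ n then j * (if n / j ≠ j then n / j else 1) else 1) := by
  have f3a : ∀ i : ℤ, 1 ≤ i → i ≤ s → i * i ≤ n := by intro i h1 h2; nlinarith
  have f3b : ∀ i : ℤ, 1 ≤ i → i * i ≤ n → i ≤ s := by
    intro i h1 h2; by_contra hc; push Not at hc; nlinarith
  have hcancel : ∀ i : ℤ, i ∣ n → i * (n / i) = n := fun i h2 => Int.mul_ediv_cancel' h2
  -- a divisor i with 2 ≤ i ≤ s lies in [2, n/2]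
  have hsmall : ∀ i : ℤ, 2 ≤ i → i ≤ s → i ∣ n → i ≤ n / 2 ∧ i ≤ n / i := by
    intro i h1 h2 h3
    have hc := hcancel i h3
    have hii := f3a i (by omega) h2
    have hic : i ≤ n / i := by nlinarith [hc, hii]
    constructor
    · rw [Int.le_ediv_iff_mul_le (by norm_num : (0:ℤ) < 2)]
      nlinarith
    · exact hic
  -- the partner d = n/i, when it differs from i, is a divisor in (s, n/2]
  have hlarge : ∀ i : ℤ, 2 ≤ i → i ≤ s → i ∣ n → n / i ≠ i →
      2 ≤ n / i ∧ n / i ≤ n / 2 ∧ s < n / i ∧ (n / i) ∣ n := by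
    intro i h1 h2 h3 h4
    have hc := hcancel i h3
    have hii := f3a i (by omega) h2
    have hic : i < n / i := by
      have : i ≤ n / i := by nlinarith
      omega
    refine ⟨by omega, ?_, ?_, ⟨i, by linarith [hc]⟩⟩
    · rw [Int.le_ediv_iff_mul_le (by norm_num : (0:ℤ) < 2)]
      nlinarith
    · by_contra hds
      push Not at hds
      have := f3a (n / i) (by omega) hds
      nlinarith
  -- conversely a divisor d with s < d ≤ n/2 is the partner of i = n/d ∈ [2, s]
  have hconv : ∀ d : ℤ, 2 ≤ d → d ≤ n / 2 → s < d → d ∣ n →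
      2 ≤ n / d ∧ n / d ≤ s ∧ (n / d) ∣ n ∧ n / (n / d) = d ∧ n / (n / d) ≠ n / d := by
    intro d h1 h2 h3 h4
    have hc := hcancel d h4
    have hd2 : d * 2 ≤ n := by
      rw [Int.le_ediv_iff_mul_le (by norm_num : (0:ℤ) < 2)] at h2; exact h2
    have hi2 : 2 ≤ n / d := by nlinarith
    have hdd : n < d * d := by nlinarith
    have hid : n / d < d := by nlinarith
    have his : n / d ≤ s := f3b _ (by omega) (by nlinarith)
    have hrec : n / (n / d) = d := by
      have hne : n / d ≠ 0 := by omega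
      calc n / (n / d) = (d * (n / d)) / (n / d) := by rw [hc]
        _ = d := Int.mul_ediv_cancel _ hne
    exact ⟨hi2, his, ⟨d, by linarith [hc]⟩, hrec, by omega⟩
  set D := (Finset.Icc 2 (n / 2)).filter (· ∣ n) with hD
  set S := (Finset.Icc 2 s).filter (· ∣ n) with hS
  set S' := S.filter (fun i => n / i ≠ i) with hS'
  set L := S'.image (fun i => n / i) with hL
  have memD : ∀ d, d ∈ D ↔ 2 ≤ d ∧ d ≤ n / 2 ∧ d ∣ n := by
    intro d; simp [hD, Finset.mem_filter, Finset.mem_Icc, and_assoc]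
  have memS : ∀ d, d ∈ S ↔ 2 ≤ d ∧ d ≤ s ∧ d ∣ n := by
    intro d; simp [hS, Finset.mem_filter, Finset.mem_Icc, and_assoc]
  have memS' : ∀ d, d ∈ S' ↔ (2 ≤ d ∧ d ≤ s ∧ d ∣ n) ∧ n / d ≠ d := by
    intro d; rw [hS', Finset.mem_filter, memS]
  have hunion : D = S ∪ L := by
    apply Finset.ext; intro d
    rw [Finset.mem_union, memD, memS, hL, Finset.mem_image]
    constructor
    · rintro ⟨h1, h2, h3⟩
      by_cases hds : d ≤ s
      · exact Or.inl ⟨h1, hds, h3⟩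
      · push Not at hds
        obtain ⟨hi2, his, hidvd, hrec, hne⟩ := hconv d h1 h2 hds h3
        exact Or.inr ⟨n / d, (memS' _).2 ⟨⟨hi2, his, hidvd⟩, by rw [hrec]; omega⟩, hrec⟩
    · rintro (⟨h1, h2, h3⟩ | ⟨i, hiS', rfl⟩)
      · exact ⟨h1, (hsmall d h1 h2 h3).1, h3⟩
      · obtain ⟨⟨h1, h2, h3⟩, h4⟩ := (memS' i).1 hiS'
        obtain ⟨g1, g2, _, g4⟩ := hlarge i h1 h2 h3 h4
        exact ⟨g1, g2, g4⟩
  have hdisj : Disjoint S L := by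
    rw [Finset.disjoint_left]
    intro d hdS hdL
    rw [hL, Finset.mem_image] at hdL
    obtain ⟨i, hiS', rfl⟩ := hdL
    obtain ⟨⟨h1, h2, h3⟩, h4⟩ := (memS' i).1 hiS'
    obtain ⟨_, _, g3, _⟩ := hlarge i h1 h2 h3 h4
    have := ((memS _).1 hdS).2.1
    omega
  have hinj : ∀ a ∈ S', ∀ b ∈ S', n / a = n / b → a = b := by
    intro a ha b hb hab
    obtain ⟨⟨ha1, ha2, ha3⟩, _⟩ := (memS' a).1 ha
    obtain ⟨⟨hb1, hb2, hb3⟩, _⟩ := (memS' b).1 hb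
    have hca := hcancel a ha3
    have hcb := hcancel b hb3
    have hapos : 2 ≤ n / a := by nlinarith [f3a a (by omega) ha2]
    have : a * (n / a) = b * (n / a) := by rw [hca, hab, hcb]
    exact mul_right_cancel₀ (by omega) this
  calc ∏ i ∈ Finset.Icc 2 (n / 2), (if i ∣ n then i else 1)
      = ∏ i ∈ D, i := by rw [hD, Finset.prod_filter]
    _ = (∏ i ∈ S, i) * ∏ i ∈ L, i := by rw [hunion, Finset.prod_union hdisj]
    _ = (∏ i ∈ S, i) * ∏ i ∈ S', (n / i) := by rw [hL, Finset.prod_image hinj]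
    _ = (∏ i ∈ S, i) * ∏ i ∈ S, (if n / i ≠ i then n / i else 1) := by
        rw [hS']; exact congrArg _ (Finset.prod_filter _ _)
    _ = ∏ i ∈ S, (i * (if n / i ≠ i then n / i else 1)) := by rw [Finset.prod_mul_distrib]
    _ = ∏ j ∈ Finset.Icc 2 s, (if j ∣ n then j * (if n / j ≠ j then n / j else 1) else 1) := by
        rw [hS, Finset.prod_filter]

-- ===== VERDICT (by name: the statement is the Claim_ definition above) =====
theorem mul_divisors_spec : Claim_equal_mul_divisors := by
  intro n _
  unfold Spec_mul_divisors mul_divisors mul_divisors_alt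
  by_cases hn : n ≤ 1
  · rw [if_neg (by omega)]
    rw [PySem.List.pyRange_one_eq_nil (by
      rw [PySem.Int.floordiv_eq_ediv_of_pos (by norm_num : (0:ℤ) < 2)]; omega)]
    rw [if_pos hn]
    rfl
  · push Not at hn
    set s : ℤ := ((Nat.sqrt n.toNat : ℕ) : ℤ) with hsdef
    have hn' : (n.toNat : ℤ) = n := by omega
    have hs1 : s * s ≤ n := by
      have h := Nat.sqrt_le' n.toNat
      calc s * s = ((Nat.sqrt n.toNat ^ 2 : ℕ) : ℤ) := by push_cast; ring
        _ ≤ (n.toNat : ℤ) := by exact_mod_cast h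
        _ = n := hn'
    have hs2 : n < (s + 1) * (s + 1) := by
      have h := Nat.lt_succ_sqrt' n.toNat
      calc n = (n.toNat : ℤ) := hn'.symm
        _ < (((Nat.sqrt n.toNat).succ ^ 2 : ℕ) : ℤ) := by exact_mod_cast h
        _ = (s + 1) * (s + 1) := by push_cast [Nat.succ_eq_add_one]; ring
    have hsnn : (0:ℤ) ≤ s := by positivity
    have hs0 : 1 ≤ s := by nlinarith
    rw [if_pos (show n > 1 by omega), if_neg (show ¬ n ≤ 1 by omega)]
    rw [PySem.Int.floordiv_eq_ediv_of_pos (by norm_num : (0:ℤ) < 2)]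
    rw [foldA_eq_prod n 2 (n / 2) 1, one_mul]
    rw [loopB_eq_prod n s hs0 hs1 hs2 2 n (le_refl 2)]
    rw [pairing n (by omega) s hs0 hs1 hs2]
    ring
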